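-- pv_equiv track=rewrite | github.com/spiritualized/lastfmcache | lastfmcache/lastfmcache.py | combine_tags
-- ===== SOURCE A (Python) =====
-- from collections import OrderedDict
-- from typing import Dict, List, Optional
--
-- def combine_tags(api_tags: Dict[str, int], web_tags: Dict[str, int]) -> Dict[str, int]:
--     """web tags have no score, however API tags are frequently missing
--     sometimes API tags all have identical scores, yet web ordering is superior"""
--     combined_tags = api_tags.copy()
--
--     for tag in web_tags:
--         if tag not in combined_tags:
--             combined_tags[tag] = web_tags[tag]
--
--     partitions = []
--     current_partition = OrderedDict()
--     current_partition_score = None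
--     for tag in combined_tags:
--         if combined_tags[tag] != current_partition_score:
--             partitions.append(current_partition)
--             current_partition = OrderedDict()
--         current_partition_score = combined_tags[tag]
--         current_partition[tag] = combined_tags[tag]
--     partitions.append(current_partition)
--
--     recombined_partitions = OrderedDict()
--
--     # reorder equally scoring partitions according to the web order
--     for partition in partitions:
--         reordered_partition = OrderedDict()
--         for tag in web_tags:
--             if tag in partition:
--                 reordered_partition[tag] = partition[tag]
--
--         # add back any stragglers
--         for tag in partition:
--             if tag not in reordered_partition:
--                 reordered_partition[tag] = partition[tag]
--
--         # flatten the partitions back down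
--         recombined_partitions.update(reordered_partition)
--
--     return recombined_partitions
-- ===== SOURCE B (Python) =====
-- def combine_tags(api_tags, web_tags):
--     combined = dict(api_tags)
--     for tag, score in web_tags.items():
--         combined.setdefault(tag, score)
--
--     # one global sort with an injective integer key (run index, then web index,
--     # then original position for tags absent from the web order)
--     widx = {tag: i for i, tag in enumerate(web_tags)}
--     run_of = {}
--     pos = {}
--     r = -1
--     prev = None
--     first = True
--     for i, (tag, score) in enumerate(combined.items()):
--         if first or score != prev:
--             r += 1
--         first = False
--         prev = score
--         run_of[tag] = r
--         pos[tag] = i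
--     big = len(web_tags)
--     span = big + len(combined) + 1
--     out = sorted(combined.items(),
--                  key=lambda kv: run_of[kv[0]] * span + widx.get(kv[0], big + pos[kv[0]]))
--     return dict(out)
-- ===== Notes on version B (the rewrite author's own statement) =====
-- stated objective: faster
-- what changed: A rescans the whole web-tag dict for every equal-score partition (and re-partitions via nested dict rebuilds); B makes one pass to record each tag's run index and position, builds a web-order index dict once, and performs a single global sort with an injective integer key (run*span + web-index, or run*span + big + position for tags absent from the web order).
import Mathlib
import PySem

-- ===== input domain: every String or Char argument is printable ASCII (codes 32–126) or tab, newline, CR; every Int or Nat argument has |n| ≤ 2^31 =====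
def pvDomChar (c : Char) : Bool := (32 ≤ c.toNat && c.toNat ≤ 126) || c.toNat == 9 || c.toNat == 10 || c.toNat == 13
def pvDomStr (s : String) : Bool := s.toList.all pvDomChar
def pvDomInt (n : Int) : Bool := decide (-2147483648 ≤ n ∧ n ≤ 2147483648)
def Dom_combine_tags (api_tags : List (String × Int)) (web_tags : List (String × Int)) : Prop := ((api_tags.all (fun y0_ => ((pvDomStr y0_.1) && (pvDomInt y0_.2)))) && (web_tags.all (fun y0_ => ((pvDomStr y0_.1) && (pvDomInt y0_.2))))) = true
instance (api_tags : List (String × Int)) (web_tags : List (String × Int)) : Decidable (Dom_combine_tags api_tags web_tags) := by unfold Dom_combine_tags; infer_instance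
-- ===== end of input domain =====

-- B replaces A's quadratic per-partition rescans of the web list by one precomputed
-- index pass and a single global sort with an injective integer key (alternative algorithm).


-- ===== PORT A =====
-- body of A's partition-building loop ('for tag in combined_tags: …')
def pvStepA (st : List (PySem.Dict String Int) × PySem.Dict String Int × Option Int)
    (kv : String × Int) :
    List (PySem.Dict String Int) × PySem.Dict String Int × Option Int :=
  let parts := if some kv.2 ≠ st.2.2 then st.1 ++ [st.2.1] else st.1
  let cur := if some kv.2 ≠ st.2.2 then PySem.Dict.empty else st.2.1
  (parts, cur.insert kv.1 kv.2, some kv.2)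

-- A's per-partition reorder: web-ordered members first, then the stragglers
def pvReorder (web_tags : List (String × Int)) (p : PySem.Dict String Int) :
    PySem.Dict String Int :=
  let reordered := web_tags.foldl
      (fun (rd : PySem.Dict String Int) kv =>
        if p.contains kv.1 then rd.insert kv.1 (p.getD kv.1 0) else rd)
      PySem.Dict.empty
  p.items.foldl
      (fun (rd : PySem.Dict String Int) kv =>
        if rd.contains kv.1 then rd else rd.insert kv.1 (p.getD kv.1 0))
      reordered

def combine_tags (api_tags : List (String × Int)) (web_tags : List (String × Int)) :
    List (String × Int) :=
  let webD : PySem.Dict String Int := PySem.Dict.mk web_tags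
  let combined := web_tags.foldl
      (fun (d : PySem.Dict String Int) kv =>
        if d.contains kv.1 then d else d.insert kv.1 (webD.getD kv.1 0))
      (PySem.Dict.mk api_tags)
  let st := combined.items.foldl pvStepA ([], PySem.Dict.empty, none)
  let partitions := st.1 ++ [st.2.1]
  let recombined := partitions.foldl
      (fun (rc : PySem.Dict String Int) p => rc.update (pvReorder web_tags p).items)
      PySem.Dict.empty
  recombined.items

-- ===== PORT B =====
-- body of B's single scan computing run index and position of every tag
def pvStepB (st : PySem.Dict String Int × PySem.Dict String Int × Int × Option Int × Bool)
    (p : Int × (String × Int)) :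
    PySem.Dict String Int × PySem.Dict String Int × Int × Option Int × Bool :=
  let r := if st.2.2.2.2 || decide (some p.2.2 ≠ st.2.2.2.1) then st.2.2.1 + 1 else st.2.2.1
  (st.1.insert p.2.1 r, st.2.1.insert p.2.1 p.1, r, some p.2.2, false)

def combine_tags_alt (api_tags : List (String × Int)) (web_tags : List (String × Int)) :
    List (String × Int) :=
  let combined := web_tags.foldl
      (fun (d : PySem.Dict String Int) kv => d.setdefault kv.1 kv.2)
      (PySem.Dict.mk api_tags)
  let widx : PySem.Dict String Int := (PySem.List.enumerate (web_tags.map (·.1))).foldl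
      (fun d p => d.insert p.2 p.1) PySem.Dict.empty
  let st := (PySem.List.enumerate combined.items).foldl pvStepB
      (PySem.Dict.empty, PySem.Dict.empty, -1, none, true)
  let run_of := st.1
  let pos := st.2.1
  let big : Int := web_tags.length
  let span : Int := big + combined.size + 1
  let out := PySem.List.sorted combined.items
      (fun kv => run_of.getD kv.1 0 * span + widx.getD kv.1 (big + pos.getD kv.1 0)) false
  (PySem.Dict.ofList out).items

-- ===== PRECONDITION & SPEC =====
-- Pre_ restricts the association lists to distinct keys: the Python arguments are dicts,
-- whose keys are necessarily distinct, so nothing A accepts is excluded.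
def Pre_combine_tags (api_tags : List (String × Int)) (web_tags : List (String × Int)) : Prop :=
  (api_tags.map (·.1)).Nodup ∧ (web_tags.map (·.1)).Nodup
instance (api_tags : List (String × Int)) (web_tags : List (String × Int)) :
    Decidable (Pre_combine_tags api_tags web_tags) := by unfold Pre_combine_tags; infer_instance
def pvWitness_combine_tags : (List (String × Int)) × (List (String × Int)) :=
  ([("rock", 100), ("pop", 100), ("jazz", 50)], [("pop", 90), ("indie", 80), ("rock", 70)])
def Spec_combine_tags (api_tags : List (String × Int)) (web_tags : List (String × Int))
    (out : List (String × Int)) : Prop := out = combine_tags_alt api_tags web_tags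
instance (api_tags : List (String × Int)) (web_tags : List (String × Int))
    (out : List (String × Int)) : Decidable (Spec_combine_tags api_tags web_tags out) := by
  unfold Spec_combine_tags; infer_instance

-- ===== CLAIM (what is proved, stated in full; the proofs are below) =====
def Claim_equal_combine_tags : Prop := ∀ (api_tags : List (String × Int)) (web_tags : List (String × Int)), Dom_combine_tags api_tags web_tags → Pre_combine_tags api_tags web_tags → Spec_combine_tags api_tags web_tags (combine_tags api_tags web_tags)

-- ===== LEMMAS AND PROOFS =====

-- the list a reordered partition's items come to: web-ordered members, then stragglers
def pvHeadL (web : List (String × Int)) (p : PySem.Dict String Int) : List (String × Int) :=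
  (web.filter (fun kv => p.contains kv.1)).map (fun kv => (kv.1, p.getD kv.1 0))
def pvTailL (web : List (String × Int)) (p : PySem.Dict String Int) : List (String × Int) :=
  p.items.filter (fun kv => !((PySem.Dict.mk web).contains kv.1))
def pvPiece (web : List (String × Int)) (p : PySem.Dict String Int) : List (String × Int) :=
  pvHeadL web p ++ pvTailL web p

-- generic: getD after a fold of inserts with pairwise-distinct keys
theorem pv_getD_foldl_insertK_notmem {β : Type} (ps : List β) (k : β → String) (v : β → Int)
    (d : PySem.Dict String Int) (dflt : Int) (t : String) (h : ∀ a ∈ ps, k a ≠ t) :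
    ((ps.foldl (fun d x => d.insert (k x) (v x)) d).getD t dflt) = d.getD t dflt := by
  induction ps generalizing d with
  | nil => simp
  | cons x t ih =>
      simp only [List.foldl_cons]
      rw [ih (d.insert (k x) (v x)) (fun a ha => h a (List.mem_cons_of_mem _ ha)),
        PySem.Dict.getD_insert_of_ne _ _ _ (Ne.symm (h x (List.mem_cons_self)))]

theorem pv_getD_foldl_insertK {β : Type} (ps : List β) (k : β → String) (v : β → Int)
    (d : PySem.Dict String Int) (dflt : Int) (hnd : (ps.map k).Nodup) :
    ∀ a ∈ ps, ((ps.foldl (fun d x => d.insert (k x) (v x)) d).getD (k a) dflt) = v a := by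
  induction ps generalizing d with
  | nil => simp
  | cons x t ih =>
      simp only [List.map_cons, List.nodup_cons, List.mem_map] at hnd
      intro a ha
      rcases List.mem_cons.1 ha with rfl | ha
      · simp only [List.foldl_cons]
        rw [pv_getD_foldl_insertK_notmem t k v _ dflt (k a)
            (fun b hb => fun hcontra => hnd.1 ⟨b, hb, hcontra⟩)]
        · exact PySem.Dict.getD_insert_self _ _ _ _
      · exact ih _ hnd.2 a ha

-- generic: dict.update with fresh distinct keys appends
theorem pv_update_items_fresh (rc : PySem.Dict String Int) (l : List (String × Int))
    (hfresh : ∀ a ∈ l, rc.contains a.1 = false) (hnd : (l.map (·.1)).Nodup) :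
    (rc.update l).items = rc.items ++ l := by
  have h := PySem.Dict.items_foldl_insert_fresh (κ := String) (ν := Int)
    l (fun a => a.1) (fun a => a.2) rc hfresh hnd
  simpa using h

-- generic: A's straggler loop ('if tag not in rd: rd[tag] = …') appends the fresh part
theorem pv_foldl_guard_insert (l : List (String × Int)) (v : String × Int → Int) :
    ∀ (d : PySem.Dict String Int), (l.map (·.1)).Nodup →
    (l.foldl (fun (rd : PySem.Dict String Int) kv =>
        if rd.contains kv.1 then rd else rd.insert kv.1 (v kv)) d).items
      = d.items ++ (l.filter (fun kv => !(d.contains kv.1))).map (fun kv => (kv.1, v kv)) := by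
  induction l with
  | nil => intro d _; simp
  | cons kv t ih =>
      intro d hnd
      simp only [List.map_cons, List.nodup_cons, List.mem_map] at hnd
      simp only [List.foldl_cons, List.filter_cons]
      cases hc : d.contains kv.1 with
      | true =>
          simp only [if_true, Bool.not_true]
          rw [ih d hnd.2]
          simp
      | false =>
          simp only [Bool.false_eq_true, if_false, Bool.not_false]
          rw [ih (d.insert kv.1 (v kv)) hnd.2,
            PySem.Dict.items_insert_of_not_contains d (v kv) hc]
          have hfeq : t.filter (fun x => !((d.insert kv.1 (v kv)).contains x.1))
              = t.filter (fun x => !(d.contains x.1)) := by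
            apply List.filter_congr
            intro x hx
            have hne : x.1 ≠ kv.1 := fun hcontra => hnd.1 ⟨x, hx, hcontra⟩
            rw [PySem.Dict.contains_insert]
            simp [hne]
          rw [hfeq]
          simp

-- the reorder phase, characterised
theorem pv_reorder_items (web : List (String × Int)) (p : PySem.Dict String Int)
    (hweb : (web.map (·.1)).Nodup) (hp : p.keys.Nodup) :
    (pvReorder web p).items = pvPiece web p := by
  unfold pvReorder
  have hpitems : (p.items.map (·.1)).Nodup := hp
  -- first loop: insert the web-ordered members of p
  have h1 : (web.foldl
      (fun (rd : PySem.Dict String Int) kv =>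
        if p.contains kv.1 then rd.insert kv.1 (p.getD kv.1 0) else rd)
      PySem.Dict.empty).items = pvHeadL web p := by
    rw [← List.foldl_filter]
    have hnd : ((web.filter (fun kv => p.contains kv.1)).map (·.1)).Nodup :=
      List.Sublist.nodup (List.Sublist.map (fun kv : String × Int => kv.1) List.filter_sublist) hweb
    have := PySem.Dict.items_foldl_insert_fresh
      (web.filter (fun kv => p.contains kv.1)) (fun kv => kv.1) (fun kv => p.getD kv.1 0)
      PySem.Dict.empty (fun a _ => PySem.Dict.contains_empty a.1) hnd
    simpa [pvHeadL] using this
  set rd1 := web.foldl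
      (fun (rd : PySem.Dict String Int) kv =>
        if p.contains kv.1 then rd.insert kv.1 (p.getD kv.1 0) else rd)
      PySem.Dict.empty with hrd1
  -- second loop: append the stragglers
  rw [pv_foldl_guard_insert p.items (fun kv => p.getD kv.1 0) rd1 hpitems, h1]
  unfold pvPiece pvTailL
  congr 1
  -- the straggler test: 'not in reordered' = 'not in the web dict'
  have hfeq : p.items.filter (fun kv => !(rd1.contains kv.1))
      = p.items.filter (fun kv => !((PySem.Dict.mk web).contains kv.1)) := by
    apply List.filter_congr
    intro kv hkv
    have hpc : p.contains kv.1 = true := by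
      rw [PySem.Dict.contains_iff_mem_keys]
      exact List.mem_map.2 ⟨kv, hkv, rfl⟩
    have hkeys : rd1.keys = (web.filter (fun kv => p.contains kv.1)).map (·.1) := by
      show rd1.items.map (·.1) = _
      rw [h1]; unfold pvHeadL; rw [List.map_map]; rfl
    rw [PySem.Dict.contains_eq_decide_mem_keys rd1, hkeys,
      PySem.Dict.contains_eq_decide_mem_keys, PySem.Dict.keys_mk]
    congr 1
    simp only [decide_eq_decide, List.mem_map, List.mem_filter]
    constructor
    · rintro ⟨w, ⟨hw, _⟩, hww⟩; exact ⟨w, hw, hww⟩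
    · rintro ⟨w, hw, hww⟩; exact ⟨w, ⟨hw, hww ▸ hpc⟩, hww⟩
  rw [hfeq]
  -- the straggler values are the items themselves
  have : ∀ kv ∈ p.items.filter (fun kv => !((PySem.Dict.mk web).contains kv.1)),
      (kv.1, p.getD kv.1 0) = kv := by
    intro kv hkv
    have hmem : (kv.1, kv.2) ∈ p.items := by
      simpa using List.mem_of_mem_filter hkv
    rw [PySem.Dict.getD_of_mem_items p hmem hp 0]
  rw [List.map_congr_left this, List.map_id']

-- a piece is a permutation of its partition's items
theorem pv_piece_perm (web : List (String × Int)) (p : PySem.Dict String Int)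
    (hweb : (web.map (·.1)).Nodup) (hp : p.keys.Nodup) :
    (pvPiece web p).Perm p.items := by
  have hpitems : (p.items.map (·.1)).Nodup := hp
  have hitems_nodup : p.items.Nodup := List.Nodup.of_map _ hpitems
  -- the head is a permutation of the web-members of the partition
  have hnd_head : (pvHeadL web p).Nodup := by
    apply List.Nodup.of_map (·.1)
    unfold pvHeadL
    rw [List.map_map]
    have : ((fun kv : String × Int => kv.1) ∘ (fun kv : String × Int => (kv.1, p.getD kv.1 0)))
        = (fun kv : String × Int => kv.1) := rfl
    rw [this]
    exact List.Sublist.nodup (List.Sublist.map (fun kv : String × Int => kv.1) List.filter_sublist) hweb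
  have hperm1 : (pvHeadL web p).Perm
      (p.items.filter (fun kv => (PySem.Dict.mk web).contains kv.1)) := by
    rw [List.perm_ext_iff_of_nodup hnd_head (hitems_nodup.filter _)]
    intro x
    unfold pvHeadL
    simp only [List.mem_map, List.mem_filter]
    constructor
    · rintro ⟨w, ⟨hw, hwc⟩, rfl⟩
      have hwk : w.1 ∈ p.keys := (PySem.Dict.contains_iff_mem_keys p w.1).1 hwc
      rcases List.mem_map.1 hwk with ⟨it, hit, hitw⟩
      have : p.getD w.1 0 = it.2 := by
        rw [← hitw]
        exact PySem.Dict.getD_of_mem_items p (by simpa using hit) hp 0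
      refine ⟨?_, ?_⟩
      · rw [this, ← hitw]; simpa using hit
      · rw [PySem.Dict.contains_eq_decide_mem_keys, PySem.Dict.keys_mk]
        exact decide_eq_true (List.mem_map.2 ⟨w, hw, rfl⟩)
    · rintro ⟨hx, hxc⟩
      rw [PySem.Dict.contains_eq_decide_mem_keys, PySem.Dict.keys_mk] at hxc
      rcases List.mem_map.1 (of_decide_eq_true hxc) with ⟨w, hw, hww⟩
      refine ⟨w, ⟨hw, ?_⟩, ?_⟩
      · rw [PySem.Dict.contains_iff_mem_keys, hww]
        exact List.mem_map.2 ⟨x, hx, rfl⟩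
      · have : p.getD x.1 0 = x.2 :=
          PySem.Dict.getD_of_mem_items p (by simpa using hx) hp 0
        rw [hww, this]
  -- glue with the complementary filter
  unfold pvPiece pvTailL
  exact List.Perm.trans (hperm1.append (List.Perm.refl _)) (List.filter_append_perm _ _)

-- the two combined-dict loops agree
theorem pv_combined_eq (api web : List (String × Int)) (hweb : (web.map (·.1)).Nodup) :
    web.foldl
      (fun (d : PySem.Dict String Int) kv =>
        if d.contains kv.1 then d else d.insert kv.1 ((PySem.Dict.mk web).getD kv.1 0))
      (PySem.Dict.mk api)
    = web.foldl (fun (d : PySem.Dict String Int) kv => d.setdefault kv.1 kv.2)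
        (PySem.Dict.mk api) := by
  apply PySem.List.foldl_congr_mem
  intro d kv hkv
  cases hc : d.contains kv.1 with
  | true => simp [PySem.Dict.setdefault_of_contains d _ hc]
  | false =>
      rw [PySem.Dict.setdefault_of_not_contains d _ hc]
      simp only [Bool.false_eq_true, if_false]
      have hmem : (kv.1, kv.2) ∈ (PySem.Dict.mk web).items := by simpa using hkv
      have hk : (PySem.Dict.mk web).keys.Nodup := by
        rw [PySem.Dict.keys_mk]; exact hweb
      rw [PySem.Dict.getD_of_mem_items _ hmem hk 0]

theorem pv_nodup_keys_foldl_setdefault (web : List (String × Int)) :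
    ∀ d : PySem.Dict String Int, d.keys.Nodup →
    (web.foldl (fun (d : PySem.Dict String Int) kv => d.setdefault kv.1 kv.2) d).keys.Nodup := by
  induction web with
  | nil => intro d hd; simpa using hd
  | cons kv t ih =>
      intro d hd
      simp only [List.foldl_cons]
      cases hc : d.contains kv.1 with
      | true => rw [PySem.Dict.setdefault_of_contains d _ hc]; exact ih d hd
      | false =>
          rw [PySem.Dict.setdefault_of_not_contains d _ hc]
          exact ih _ (PySem.Dict.nodup_keys_insert d kv.1 kv.2 hd)

theorem pv_combined_nodup (api web : List (String × Int)) (hapi : (api.map (·.1)).Nodup) :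
    (web.foldl (fun (d : PySem.Dict String Int) kv => d.setdefault kv.1 kv.2)
        (PySem.Dict.mk api)).keys.Nodup := by
  apply pv_nodup_keys_foldl_setdefault
  rw [PySem.Dict.keys_mk]; exact hapi

-- the synchronised invariant of A's partition loop and B's run/pos loop
theorem pv_sync (l : List (String × Int)) :
    ∀ (pre : List (String × Int)) (parts : List (PySem.Dict String Int))
      (cur : PySem.Dict String Int) (score : Option Int) (ro po : PySem.Dict String Int)
      (r s : Int) (first : Bool),
    ((pre ++ l).map (·.1)).Nodup →
    (((parts ++ [cur]).map PySem.Dict.items).flatten = pre) →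
    (first = true → score = none) →
    r = (parts.length : Int) - 1 →
    s = (pre.length : Int) →
    (∀ j (hj : j < parts.length), ∀ kv ∈ (parts[j]).items, ro.getD kv.1 0 = (j : Int) - 1) →
    (∀ kv ∈ cur.items, ro.getD kv.1 0 = (parts.length : Int) - 1) →
    (∀ j (hj : j < pre.length), po.getD ((pre[j]).1) 0 = (j : Int)) →
    (((((l.foldl pvStepA (parts, cur, score)).1 ++ [(l.foldl pvStepA (parts, cur, score)).2.1]).map PySem.Dict.items).flatten = pre ++ l)
     ∧ (∀ j (hj : j < ((l.foldl pvStepA (parts, cur, score)).1 ++ [(l.foldl pvStepA (parts, cur, score)).2.1]).length),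
          ∀ kv ∈ (((l.foldl pvStepA (parts, cur, score)).1 ++ [(l.foldl pvStepA (parts, cur, score)).2.1])[j]).items,
          ((PySem.List.enumerate l s).foldl pvStepB (ro, po, r, score, first)).1.getD kv.1 0 = (j : Int) - 1)
     ∧ (∀ j (hj : j < (pre ++ l).length),
          ((PySem.List.enumerate l s).foldl pvStepB (ro, po, r, score, first)).2.1.getD (((pre ++ l)[j]).1) 0 = (j : Int))) := by
  induction l with
  | nil =>
      intro pre parts cur score ro po r s first hnd hflat hfirst hr hs hro hcur hpo
      refine ⟨by simpa using hflat, ?_, by simpa using hpo⟩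
      intro j hj kv hkv
      simp only [List.foldl_nil] at hj hkv ⊢
      rcases Nat.lt_or_ge j parts.length with hlt | hge
      · rw [List.getElem_append_left hlt] at hkv
        exact hro j hlt kv hkv
      · have hj' : j = parts.length := by
          simp only [List.length_append, List.length_cons, List.length_nil] at hj
          omega
        subst hj'
        rw [List.getElem_append_right (Nat.le_refl _)] at hkv
        simp only [Nat.sub_self, List.getElem_cons_zero] at hkv
        exact hcur kv hkv
  | cons kv t ih =>
      intro pre parts cur score ro po r s first hnd hflat hfirst hr hs hro hcur hpo
      have hnd' : (((pre ++ [kv]) ++ t).map (·.1)).Nodup := by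
        simpa [List.append_assoc] using hnd
      have hkv_pre : kv.1 ∉ pre.map (·.1) := by
        have hnd2 : ((pre.map (·.1)) ++ (kv.1 :: t.map (·.1))).Nodup := by
          simpa using hnd
        intro hmem
        exact (List.disjoint_of_nodup_append hnd2) hmem (List.mem_cons_self)
      have hpre_keys : ∀ q ∈ pre, q.1 ≠ kv.1 := by
        intro q hq hcontra
        exact hkv_pre (hcontra ▸ List.mem_map.2 ⟨q, hq, rfl⟩)
      have hcur_sub : ∀ q ∈ cur.items, q ∈ pre := by
        intro q hq
        rw [← hflat]
        exact List.mem_flatten.2 ⟨cur.items, List.mem_map.2 ⟨cur, by simp, rfl⟩, hq⟩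
      have hparts_sub : ∀ j (hj : j < parts.length), ∀ q ∈ (parts[j]).items, q ∈ pre := by
        intro j hj q hq
        rw [← hflat]
        refine List.mem_flatten.2 ⟨(parts[j]).items, List.mem_map.2 ⟨parts[j], ?_, rfl⟩, hq⟩
        exact List.mem_append_left _ (List.getElem_mem hj)
      have hcur_not : cur.contains kv.1 = false := by
        cases hcc : cur.contains kv.1 with
        | false => rfl
        | true =>
            exfalso
            have := (PySem.Dict.contains_iff_mem_keys cur kv.1).1 hcc
            rcases List.mem_map.1 this with ⟨q, hq, hq1⟩
            exact hpre_keys q (hcur_sub q hq) hq1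
      have happ : pre ++ kv :: t = (pre ++ [kv]) ++ t := by simp
      have hs1 : s + 1 = (((pre ++ [kv]).length : Nat) : Int) := by
        simp [hs]
      simp only [List.foldl_cons, PySem.List.enumerate_cons]
      by_cases hcond : some kv.2 = score
      · -- NO break: the element joins the current partition and keeps the run index
        subst hcond
        have hfirst_false : first = false := by
          cases hf : first with
          | false => rfl
          | true => exact absurd (hfirst hf) (by simp)
        subst hfirst_false
        have hstepA : pvStepA (parts, cur, some kv.2) kv
            = (parts, cur.insert kv.1 kv.2, some kv.2) := by
          simp [pvStepA]
        have hstepB : pvStepB (ro, po, r, some kv.2, false) (s, kv)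
            = (ro.insert kv.1 r, po.insert kv.1 s, r, some kv.2, false) := by
          simp [pvStepB]
        have hflat' : (((parts ++ [cur.insert kv.1 kv.2]).map PySem.Dict.items).flatten
            = pre ++ [kv]) := by
          rw [List.map_append, List.flatten_append] at hflat ⊢
          simp only [List.map_cons, List.map_nil, List.flatten_cons, List.flatten_nil,
            List.append_nil] at hflat ⊢
          rw [PySem.Dict.items_insert_of_not_contains cur kv.2 hcur_not, ← List.append_assoc,
            hflat]
        have hro' : ∀ j (hj : j < parts.length), ∀ q ∈ (parts[j]).items,
            (ro.insert kv.1 r).getD q.1 0 = (j : Int) - 1 := by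
          intro j hj q hq
          rw [PySem.Dict.getD_insert_of_ne ro _ _ (hpre_keys q (hparts_sub j hj q hq))]
          exact hro j hj q hq
        have hcur' : ∀ q ∈ (cur.insert kv.1 kv.2).items,
            (ro.insert kv.1 r).getD q.1 0 = (parts.length : Int) - 1 := by
          intro q hq
          rw [PySem.Dict.items_insert_of_not_contains cur kv.2 hcur_not] at hq
          rcases List.mem_append.1 hq with hq | hq
          · rw [PySem.Dict.getD_insert_of_ne ro _ _ (hpre_keys q (hcur_sub q hq))]
            exact hcur q hq
          · simp only [List.mem_cons, List.not_mem_nil, or_false] at hq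
            subst hq
            rw [PySem.Dict.getD_insert_self]
            exact hr
        have hpo' : ∀ j (hj : j < (pre ++ [kv]).length),
            (po.insert kv.1 s).getD (((pre ++ [kv])[j]).1) 0 = (j : Int) := by
          intro j hj
          rcases Nat.lt_or_ge j pre.length with hlt | hge
          · rw [List.getElem_append_left hlt,
              PySem.Dict.getD_insert_of_ne po _ _ (hpre_keys _ (List.getElem_mem hlt))]
            exact hpo j hlt
          · have hj' : j = pre.length := by
              simp only [List.length_append, List.length_cons, List.length_nil] at hj
              omega
            subst hj'
            rw [List.getElem_append_right (Nat.le_refl _)]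
            simp only [Nat.sub_self, List.getElem_cons_zero]
            rw [PySem.Dict.getD_insert_self]
            exact hs
        have hres := ih (pre ++ [kv]) parts (cur.insert kv.1 kv.2) (some kv.2)
          (ro.insert kv.1 r) (po.insert kv.1 s) r (s + 1) false hnd' hflat'
          (by simp) hr hs1 hro' hcur' hpo'
        simp only [hstepA, hstepB]
        refine ⟨hres.1.trans happ.symm, hres.2.1, ?_⟩
        intro j hj
        have hj2 : j < ((pre ++ [kv]) ++ t).length := by
          rw [← happ]; exact hj
        have := hres.2.2 j hj2
        rwa [← List.getElem_of_eq happ hj] at this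
      · -- BREAK: a new partition and a new run begin
        have hstepA : pvStepA (parts, cur, score) kv
            = (parts ++ [cur], PySem.Dict.empty.insert kv.1 kv.2, some kv.2) := by
          simp only [pvStepA]
          rw [if_pos hcond, if_pos hcond]
        have hstepB : pvStepB (ro, po, r, score, first) (s, kv)
            = (ro.insert kv.1 (r + 1), po.insert kv.1 s, r + 1, some kv.2, false) := by
          simp only [pvStepB]
          have : (first || decide (some kv.2 ≠ score)) = true := by
            simp [hcond]
          rw [this]
          simp
        have hflat' : ((((parts ++ [cur]) ++ [PySem.Dict.empty.insert kv.1 kv.2]).map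
            PySem.Dict.items).flatten = pre ++ [kv]) := by
          rw [List.map_append, List.flatten_append, hflat]
          simp only [List.map_cons, List.map_nil, List.flatten_cons, List.flatten_nil,
            List.append_nil]
          rw [PySem.Dict.items_insert_of_not_contains PySem.Dict.empty kv.2
            (PySem.Dict.contains_empty kv.1)]
          simp [PySem.Dict.empty]
        have hr' : r + 1 = (((parts ++ [cur]).length : Nat) : Int) - 1 := by
          simp only [List.length_append, List.length_cons, List.length_nil]
          push_cast
          omega
        have hro' : ∀ j (hj : j < (parts ++ [cur]).length), ∀ q ∈ ((parts ++ [cur])[j]).items,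
            (ro.insert kv.1 (r + 1)).getD q.1 0 = (j : Int) - 1 := by
          intro j hj q hq
          rcases Nat.lt_or_ge j parts.length with hlt | hge
          · rw [List.getElem_append_left hlt] at hq
            rw [PySem.Dict.getD_insert_of_ne ro _ _ (hpre_keys q (hparts_sub j hlt q hq))]
            exact hro j hlt q hq
          · have hj' : j = parts.length := by
              simp only [List.length_append, List.length_cons, List.length_nil] at hj
              omega
            subst hj'
            rw [List.getElem_append_right (Nat.le_refl _)] at hq
            simp only [Nat.sub_self, List.getElem_cons_zero] at hq
            rw [PySem.Dict.getD_insert_of_ne ro _ _ (hpre_keys q (hcur_sub q hq))]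
            exact hcur q hq
        have hcur' : ∀ q ∈ (PySem.Dict.empty.insert kv.1 kv.2).items,
            (ro.insert kv.1 (r + 1)).getD q.1 0 = (((parts ++ [cur]).length : Nat) : Int) - 1 := by
          intro q hq
          rw [PySem.Dict.items_insert_of_not_contains PySem.Dict.empty kv.2
            (PySem.Dict.contains_empty kv.1)] at hq
          simp only [PySem.Dict.empty] at hq
          simp only [List.nil_append, List.mem_cons, List.not_mem_nil, or_false] at hq
          subst hq
          rw [PySem.Dict.getD_insert_self, ← hr']
        have hpo' : ∀ j (hj : j < (pre ++ [kv]).length),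
            (po.insert kv.1 s).getD (((pre ++ [kv])[j]).1) 0 = (j : Int) := by
          intro j hj
          rcases Nat.lt_or_ge j pre.length with hlt | hge
          · rw [List.getElem_append_left hlt,
              PySem.Dict.getD_insert_of_ne po _ _ (hpre_keys _ (List.getElem_mem hlt))]
            exact hpo j hlt
          · have hj' : j = pre.length := by
              simp only [List.length_append, List.length_cons, List.length_nil] at hj
              omega
            subst hj'
            rw [List.getElem_append_right (Nat.le_refl _)]
            simp only [Nat.sub_self, List.getElem_cons_zero]
            rw [PySem.Dict.getD_insert_self]
            exact hs
        have hres := ih (pre ++ [kv]) (parts ++ [cur]) (PySem.Dict.empty.insert kv.1 kv.2)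
          (some kv.2) (ro.insert kv.1 (r + 1)) (po.insert kv.1 s) (r + 1) (s + 1) false hnd'
          hflat' (by simp) hr' hs1 hro' hcur' hpo'
        simp only [hstepA, hstepB]
        refine ⟨hres.1.trans happ.symm, hres.2.1, ?_⟩
        intro j hj
        have hj2 : j < ((pre ++ [kv]) ++ t).length := by
          rw [← happ]; exact hj
        have := hres.2.2 j hj2
        rwa [← List.getElem_of_eq happ hj] at this

-- the web-index dict: each web tag maps to its position, others fall to the default
theorem pv_widx_mem (web : List (String × Int)) (hweb : (web.map (·.1)).Nodup)
    (j : Nat) (hj : j < web.length) (dflt : Int) :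
    ((PySem.List.enumerate (web.map (·.1))).foldl
      (fun d p => d.insert p.2 p.1) PySem.Dict.empty).getD ((web[j]).1) dflt = (j : Int) := by
  have hnd : ((PySem.List.enumerate (web.map (·.1))).map (·.2)).Nodup := by
    rw [PySem.List.map_snd_enumerate]
    exact hweb
  have hjm : j < (PySem.List.enumerate (web.map (·.1))).length := by
    rw [PySem.List.length_enumerate]
    simpa using hj
  have hmem : ((0 : Int) + (j : Int), (web[j]).1) ∈ PySem.List.enumerate (web.map (·.1)) := by
    have h0 := PySem.List.getElem_enumerate (web.map (·.1)) 0 j hjm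
    rw [List.getElem_map] at h0
    rw [← h0]
    exact List.getElem_mem hjm
  have := pv_getD_foldl_insertK (PySem.List.enumerate (web.map (·.1)))
    (fun p => p.2) (fun p => p.1) PySem.Dict.empty dflt hnd
    ((0 : Int) + (j : Int), (web[j]).1) hmem
  simpa using this

theorem pv_widx_notmem (web : List (String × Int)) (t : String)
    (h : t ∉ web.map (·.1)) (dflt : Int) :
    ((PySem.List.enumerate (web.map (·.1))).foldl
      (fun d p => d.insert p.2 p.1) PySem.Dict.empty).getD t dflt = dflt := by
  rw [pv_getD_foldl_insertK_notmem (PySem.List.enumerate (web.map (·.1)))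
    (fun p => p.2) (fun p => p.1) PySem.Dict.empty dflt t ?_]
  · exact PySem.Dict.getD_empty t dflt
  · intro a ha hcontra
    apply h
    rw [← hcontra, ← PySem.List.map_snd_enumerate (web.map (·.1)) 0]
    exact List.mem_map.2 ⟨a, ha, rfl⟩

-- the recombine loop concatenates the reordered partitions
theorem pv_fold_update (g : PySem.Dict String Int → List (String × Int)) :
    ∀ (ps : List (PySem.Dict String Int)) (rc : PySem.Dict String Int),
    ((rc.items ++ ((ps.map g).flatten)).map (·.1)).Nodup →
    (ps.foldl (fun rc p => rc.update (g p)) rc).items = rc.items ++ (ps.map g).flatten := by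
  intro ps
  induction ps with
  | nil => intro rc h; simp
  | cons p rest ih =>
      intro rc hnd
      simp only [List.map_cons, List.flatten_cons, List.foldl_cons]
      have hnd' : ((rc.items ++ (g p ++ (rest.map g).flatten)).map (·.1)).Nodup := hnd
      rw [List.map_append, List.nodup_append] at hnd'
      have hgp_nodup : ((g p).map (·.1)).Nodup := by
        have h2 := hnd'.2.1
        rw [List.map_append, List.nodup_append] at h2
        exact h2.1
      have hfresh : ∀ a ∈ g p, rc.contains a.1 = false := by
        intro a ha
        cases hc : rc.contains a.1 with
        | false => rfl
        | true =>
            exfalso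
            have hk := (PySem.Dict.contains_iff_mem_keys rc a.1).1 hc
            have hmem2 : a.1 ∈ (g p ++ (rest.map g).flatten).map (·.1) := by
              rw [List.map_append]
              exact List.mem_append_left _ (List.mem_map.2 ⟨a, ha, rfl⟩)
            exact hnd'.2.2 a.1 hk a.1 hmem2 rfl
      have hup := pv_update_items_fresh rc (g p) hfresh hgp_nodup
      have hres := ih (rc.update (g p)) ?_
      · rw [hres, hup, List.append_assoc]
      · rw [hup]
        simpa [List.append_assoc] using hnd

-- piecewise permutations concatenate
theorem pv_perm_flatten (web : List (String × Int)) :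
    ∀ (ps : List (PySem.Dict String Int)),
    (∀ p ∈ ps, (pvPiece web p).Perm p.items) →
    ((ps.map (pvPiece web)).flatten).Perm ((ps.map PySem.Dict.items).flatten) := by
  intro ps
  induction ps with
  | nil => intro _; simp
  | cons p rest ih =>
      intro h
      simp only [List.map_cons, List.flatten_cons]
      exact (h p (by simp)).append (ih (fun q hq => h q (List.mem_cons_of_mem _ hq)))

-- ===== VERDICT (by name: the statement is the Claim_ definition above) =====
theorem combine_tags_spec : Claim_equal_combine_tags := by
  intro api web _hdom hpre
  obtain ⟨hapi, hweb⟩ := hpre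
  simp only [Spec_combine_tags, combine_tags, combine_tags_alt]
  rw [pv_combined_eq api web hweb]
  simp only [PySem.Dict.size]
  set l := (List.foldl (fun (d : PySem.Dict String Int) kv => d.setdefault kv.1 kv.2)
      (PySem.Dict.mk api) web).items with hldef
  have hlnd : (l.map (·.1)).Nodup := pv_combined_nodup api web hapi
  have hsync := pv_sync l [] [] PySem.Dict.empty none PySem.Dict.empty PySem.Dict.empty
      (-1) 0 true (by simpa using hlnd) (by rfl) (fun _ => rfl) (by norm_num) (by norm_num)
      (fun j hj => absurd hj (Nat.not_lt_zero j))
      (fun kv hkv => absurd hkv List.not_mem_nil)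
      (fun j hj => absurd hj (Nat.not_lt_zero j))
  simp only [List.nil_append] at hsync
  obtain ⟨hflat, hro, hpo⟩ := hsync
  set stA := List.foldl pvStepA ([], PySem.Dict.empty, none) l with hstA
  set stB := List.foldl pvStepB (PySem.Dict.empty, PySem.Dict.empty, -1, none, true)
      (PySem.List.enumerate l 0) with hstB
  set parts := stA.1 ++ [stA.2.1] with hparts
  set ro := stB.1 with hrodef
  set po := stB.2.1 with hpodef
  set widx := List.foldl (fun (d : PySem.Dict String Int) p => d.insert p.2 p.1)
      PySem.Dict.empty (PySem.List.enumerate (web.map (·.1))) with hwidxdef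
  set big := (web.length : Int) with hbig
  set span := big + (l.length : Int) + 1 with hspan
  -- per-partition facts
  have hsub : ∀ p ∈ parts, p.items.Sublist l := by
    intro p hp
    have h1 : p.items ∈ parts.map PySem.Dict.items := List.mem_map.2 ⟨p, hp, rfl⟩
    have h2 := List.sublist_flatten_of_mem h1
    rwa [hflat] at h2
  have hpnd : ∀ p ∈ parts, p.keys.Nodup := by
    intro p hp
    have h1 : (p.items.map (fun kv : String × Int => kv.1)).Nodup :=
      List.Sublist.nodup ((hsub p hp).map (fun kv : String × Int => kv.1)) hlnd
    exact h1
  have hreo : ∀ p ∈ parts, (pvReorder web p).items = pvPiece web p :=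
    fun p hp => pv_reorder_items web p hweb (hpnd p hp)
  have hpp : ∀ p ∈ parts, (pvPiece web p).Perm p.items :=
    fun p hp => pv_piece_perm web p hweb (hpnd p hp)
  set ys := (parts.map (pvPiece web)).flatten with hys
  have hperm : ys.Perm l := by
    have := pv_perm_flatten web parts hpp
    rwa [hflat] at this
  have hysnd : (ys.map (·.1)).Nodup := ((hperm.map (·.1)).nodup_iff).2 hlnd
  -- the A side flattens to ys
  have hmapg : parts.map (fun p => (pvReorder web p).items) = parts.map (pvPiece web) :=
    List.map_congr_left hreo
  have hA : (List.foldl (fun (rc : PySem.Dict String Int) p =>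
      rc.update (pvReorder web p).items) PySem.Dict.empty parts).items = ys := by
    have hemp : (PySem.Dict.empty : PySem.Dict String Int).items = [] := rfl
    rw [pv_fold_update (fun p => (pvReorder web p).items) parts PySem.Dict.empty
      (by rw [hmapg, hemp, List.nil_append, ← hys]; exact hysnd)]
    rw [hmapg, hemp, List.nil_append, ← hys]
  -- the B side sorts to ys
  have hpair : ys.Pairwise (fun a b =>
      ro.getD a.1 0 * span + widx.getD a.1 (big + po.getD a.1 0)
      < ro.getD b.1 0 * span + widx.getD b.1 (big + po.getD b.1 0)) := by
    -- worker facts about widx / po / ro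
    have hwidx_mem : ∀ (m : Nat) (hm : m < web.length), ∀ d : Int,
        widx.getD ((web[m]'hm).1) d = (m : Int) := by
      intro m hm d
      rw [hwidxdef]
      exact pv_widx_mem web hweb m hm d
    have hwidx_not : ∀ t, t ∉ web.map (·.1) → ∀ d : Int, widx.getD t d = d := by
      intro t ht d
      rw [hwidxdef]
      exact pv_widx_notmem web t ht d
    have hlen_nonneg : (0 : Int) ≤ (l.length : Int) := Int.natCast_nonneg _
    have hbig_nonneg : (0 : Int) ≤ big := by rw [hbig]; exact Int.natCast_nonneg _
    have hspan_pos : 0 < span := by rw [hspan]; omega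
    have hpo_mem : ∀ q ∈ l, 0 ≤ po.getD q.1 0 ∧ po.getD q.1 0 < (l.length : Int) := by
      intro q hq
      obtain ⟨i, hi, rfl⟩ := List.mem_iff_getElem.1 hq
      rw [hpo i hi]
      exact ⟨Int.natCast_nonneg i, by exact_mod_cast hi⟩
    have hpo_pair : l.Pairwise (fun a b => po.getD a.1 0 < po.getD b.1 0) := by
      rw [List.pairwise_iff_getElem]
      intro i j hi hj hij
      rw [hpo i hi, hpo j hj]
      exact_mod_cast hij
    have hweb_pair : web.Pairwise (fun a b => ∀ d d' : Int, widx.getD a.1 d < widx.getD b.1 d') := by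
      rw [List.pairwise_iff_getElem]
      intro i j hi hj hij d d'
      rw [hwidx_mem i hi d, hwidx_mem j hj d']
      exact_mod_cast hij
    have hro_key : ∀ j (hj : j < parts.length), ∀ x ∈ pvPiece web (parts[j]),
        ro.getD x.1 0 = (j : Int) - 1 := by
      intro j hj x hx
      have hpmem : parts[j] ∈ parts := List.getElem_mem hj
      exact hro j hj x (((hpp _ hpmem).mem_iff).1 hx)
    have hhead_bound : ∀ p ∈ parts, ∀ x ∈ pvHeadL web p, ∀ d : Int,
        0 ≤ widx.getD x.1 d ∧ widx.getD x.1 d < big := by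
      intro p hp x hx d
      obtain ⟨w, hwf, rfl⟩ := List.mem_map.1 hx
      have hw : w ∈ web := List.mem_of_mem_filter hwf
      obtain ⟨m, hm, hwm⟩ := List.mem_iff_getElem.1 hw
      have hval : widx.getD w.1 d = (m : Int) := by
        rw [← hwm]
        exact hwidx_mem m hm d
      refine ⟨?_, ?_⟩
      · rw [hval]; exact Int.natCast_nonneg m
      · rw [hval, hbig]; exact_mod_cast hm
    have htail_mem : ∀ p ∈ parts, ∀ x ∈ pvTailL web p, x ∈ p.items ∧ x.1 ∉ web.map (·.1) := by
      intro p hp x hx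
      have h1 := List.mem_of_mem_filter hx
      have h2 := (List.mem_filter.1 hx).2
      refine ⟨h1, ?_⟩
      intro hmem
      have hc : (PySem.Dict.mk web).contains x.1 = true := by
        rw [PySem.Dict.contains_eq_decide_mem_keys, PySem.Dict.keys_mk]
        exact decide_eq_true hmem
      rw [hc] at h2
      simp at h2
    have htail_bound : ∀ p ∈ parts, ∀ x ∈ pvTailL web p,
        widx.getD x.1 (big + po.getD x.1 0) = big + po.getD x.1 0
        ∧ big ≤ big + po.getD x.1 0 ∧ big + po.getD x.1 0 < span := by
      intro p hp x hx
      obtain ⟨hxi, hxnw⟩ := htail_mem p hp x hx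
      have hxl : x ∈ l := (hsub p hp).subset hxi
      obtain ⟨h0, h1⟩ := hpo_mem x hxl
      exact ⟨hwidx_not x.1 hxnw _, by omega, by rw [hspan]; omega⟩
    have hkey_bound : ∀ j (hj : j < parts.length), ∀ x ∈ pvPiece web (parts[j]),
        ((j : Int) - 1) * span ≤ ro.getD x.1 0 * span + widx.getD x.1 (big + po.getD x.1 0)
        ∧ ro.getD x.1 0 * span + widx.getD x.1 (big + po.getD x.1 0) < ((j : Int) - 1) * span + span := by
      intro j hj x hx
      have hrk := hro_key j hj x hx
      have hpmem : parts[j] ∈ parts := List.getElem_mem hj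
      rw [hrk]
      rcases List.mem_append.1 hx with hxh | hxt
      · obtain ⟨h0, h1⟩ := hhead_bound _ hpmem x hxh (big + po.getD x.1 0)
        have hblt : big < span := by rw [hspan]; omega
        constructor
        · exact le_add_of_nonneg_right h0
        · exact (add_lt_add_iff_left _).2 (lt_trans h1 hblt)
      · obtain ⟨heq, h0, h1⟩ := htail_bound _ hpmem x hxt
        rw [heq]
        constructor
        · exact le_add_of_nonneg_right (le_trans hbig_nonneg h0)
        · exact (add_lt_add_iff_left _).2 h1
    have hpiece_pair : ∀ j (hj : j < parts.length),
        (pvPiece web (parts[j])).Pairwise (fun a b =>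
          ro.getD a.1 0 * span + widx.getD a.1 (big + po.getD a.1 0)
          < ro.getD b.1 0 * span + widx.getD b.1 (big + po.getD b.1 0)) := by
      intro j hj
      have hpmem : parts[j] ∈ parts := List.getElem_mem hj
      unfold pvPiece
      rw [List.pairwise_append]
      refine ⟨?_, ?_, ?_⟩
      · -- within the head: web order is strict
        unfold pvHeadL
        rw [List.pairwise_map]
        refine (hweb_pair.filter _).imp_of_mem ?_
        intro a b ha hb hab
        dsimp only
        have hka := hro_key j hj _ (List.mem_append_left _ (List.mem_map.2 ⟨a, ha, rfl⟩))
        have hkb := hro_key j hj _ (List.mem_append_left _ (List.mem_map.2 ⟨b, hb, rfl⟩))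
        dsimp only at hka hkb
        rw [hka, hkb]
        exact (add_lt_add_iff_left _).2 (hab _ _)
      · -- within the tail: original position is strict
        unfold pvTailL
        refine ((hpo_pair.sublist (hsub _ hpmem)).filter _).imp_of_mem ?_
        intro a b ha hb hab
        have hka := hro_key j hj _ (List.mem_append_right _ ha)
        have hkb := hro_key j hj _ (List.mem_append_right _ hb)
        obtain ⟨hea, _, _⟩ := htail_bound _ hpmem a ha
        obtain ⟨heb, _, _⟩ := htail_bound _ hpmem b hb
        rw [hka, hkb, hea, heb]
        exact (add_lt_add_iff_left _).2 (by omega)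
      · -- head before tail
        intro x hx y hy
        have hkx := hro_key j hj _ (List.mem_append_left _ hx)
        have hky := hro_key j hj _ (List.mem_append_right _ hy)
        obtain ⟨_, hxlt⟩ := hhead_bound _ hpmem x hx (big + po.getD x.1 0)
        obtain ⟨hey, hyge, _⟩ := htail_bound _ hpmem y hy
        rw [hkx, hky, hey]
        exact (add_lt_add_iff_left _).2 (by omega)
    rw [hys, List.pairwise_flatten]
    constructor
    · intro s hs
      obtain ⟨jj, hjj, rfl⟩ := List.mem_iff_getElem.1 hs
      rw [List.getElem_map]
      exact hpiece_pair jj (by simpa using hjj)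
    · rw [List.pairwise_iff_getElem]
      intro i j hi hj hij x hx y hy
      rw [List.getElem_map] at hx
      rw [List.getElem_map] at hy
      have hi' : i < parts.length := by simpa using hi
      have hj' : j < parts.length := by simpa using hj
      obtain ⟨_, hxu⟩ := hkey_bound i hi' x hx
      obtain ⟨hyl, _⟩ := hkey_bound j hj' y hy
      have hij' : (i : Int) ≤ (j : Int) - 1 := by
        have : (i : Int) < (j : Int) := by exact_mod_cast hij
        omega
      have h2 : ((i : Int) - 1) * span + span = (i : Int) * span := by ring
      have h3 : (i : Int) * span ≤ ((j : Int) - 1) * span :=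
        mul_le_mul_of_nonneg_right hij' (le_of_lt hspan_pos)
      calc ro.getD x.1 0 * span + widx.getD x.1 (big + po.getD x.1 0)
          < ((i : Int) - 1) * span + span := hxu
        _ = (i : Int) * span := h2
        _ ≤ ((j : Int) - 1) * span := h3
        _ ≤ ro.getD y.1 0 * span + widx.getD y.1 (big + po.getD y.1 0) := hyl
  have hsorted : PySem.List.sorted l (fun kv =>
      ro.getD kv.1 0 * span + widx.getD kv.1 (big + po.getD kv.1 0)) = ys :=
    PySem.List.sorted_eq_of_perm_of_pairwise_lt l ys _ hperm hpair
  have hB : (PySem.Dict.ofList ys).items = ys := by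
    show (PySem.Dict.empty.update ys).items = ys
    rw [pv_update_items_fresh PySem.Dict.empty ys (fun a _ => PySem.Dict.contains_empty a.1)
      hysnd]
    rfl
  rw [hA, hsorted, hB]
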